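-- pv_equiv track=rewrite | github.com/unnikrishnansivakumar/keyDist | keyboard_distance_algorithm_nm.py | get_pos_values
-- ===== SOURCE A (Python) =====
-- def get_pos_values(stra):
--     ''' get the position values of the needleman wunsch string'''
--     pos_counter = {}
--     counter = 0
--     for i in range(len(stra)):
--         if stra[i]!='|':
--             counter+=1
--             pos_counter[i]=counter-1
--         else:
--             pos_counter[i]=counter-1
--     return pos_counter
-- ===== SOURCE B (Python) =====
-- def get_pos_values(stra):
--     ''' get the position values of the needleman wunsch string'''
--     # segment view: split at the '|' separators; within a pipe-free segment the
--     # values form an arithmetic progression, and a separator repeats the last value.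
--     n = len(stra)
--     res = {}
--     pos = 0
--     val = -1
--     for part in stra.split('|'):
--         for k in range(len(part)):
--             res[pos + k] = val + 1 + k
--         pos += len(part)
--         val += len(part)
--         if pos < n:          # the '|' between this part and the next
--             res[pos] = val
--             pos += 1
--     return res
-- ===== Notes on version B (the rewrite author's own statement) =====
-- stated objective: alternative
-- what changed: B splits the string into pipe-separated segments and fills each segment's entries as an arithmetic progression (plus one repeated value per separator), instead of A's single per-character loop with a running non-pipe counter.
import Mathlib
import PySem

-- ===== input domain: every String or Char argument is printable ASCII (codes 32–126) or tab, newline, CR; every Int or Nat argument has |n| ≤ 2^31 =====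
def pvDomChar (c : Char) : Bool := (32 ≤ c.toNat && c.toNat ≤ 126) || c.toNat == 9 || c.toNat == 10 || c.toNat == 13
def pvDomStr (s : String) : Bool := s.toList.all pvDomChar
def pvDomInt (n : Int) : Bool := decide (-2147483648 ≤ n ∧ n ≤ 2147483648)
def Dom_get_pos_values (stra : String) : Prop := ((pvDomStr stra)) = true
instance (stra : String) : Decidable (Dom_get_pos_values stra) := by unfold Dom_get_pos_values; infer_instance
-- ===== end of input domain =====

-- B splits the string into pipe-separated segments and fills each segment as an
-- arithmetic progression (plus one repeated value per separator), instead of A's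
-- per-character loop with a running non-pipe counter (objective: alternative).

-- ===== PORT A =====
-- dict pos_counter with counter, one loop over range(len(stra)); stra[i] is in range, so pyGetD is exact here
def get_pos_values (stra : String) : List (Int × Int) :=
  let cs := stra.toList
  let res := (PySem.List.pyRange 0 (cs.length : Int) 1).foldl
    (fun (st : PySem.Dict Int Int × Int) i =>
      if PySem.List.pyGetD cs i ' ' ≠ '|' then
        (st.1.insert i (st.2 + 1 - 1), st.2 + 1)
      else
        (st.1.insert i (st.2 - 1), st.2))
    (PySem.Dict.empty, 0)
  res.1.items

-- ===== PORT B =====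
-- Source B's loop body over one part of stra.split('|'): fill the segment's entries,
-- advance pos/val, and record the separator's entry when one follows (pos < n)
def pvSeg (n : Int) (st : PySem.Dict Int Int × Int × Int) (part : List Char) :
    PySem.Dict Int Int × Int × Int :=
  let d := (PySem.List.pyRange 0 (part.length : Int) 1).foldl
    (fun d k => d.insert (st.2.1 + k) (st.2.2 + 1 + k)) st.1
  let pos := st.2.1 + (part.length : Int)
  let val := st.2.2 + (part.length : Int)
  if pos < n then (d.insert pos val, pos + 1, val) else (d, pos, val)

-- stra.split('|') is ported as List.splitOn '|' on the characters (exact: nonempty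
-- single-character separator, empty pieces kept, ''.split('|') = [''])
def get_pos_values_alt (stra : String) : List (Int × Int) :=
  let n : Int := stra.toList.length
  ((stra.toList.splitOn '|').foldl (pvSeg n) (PySem.Dict.empty, 0, -1)).1.items

-- ===== PRECONDITION & SPEC =====
def Spec_get_pos_values (stra : String) (out : List (Int × Int)) : Prop := out = get_pos_values_alt stra
instance (stra : String) (out : List (Int × Int)) : Decidable (Spec_get_pos_values stra out) := by unfold Spec_get_pos_values; infer_instance

-- ===== CLAIM (what is proved, stated in full; the proofs are below) =====
def Claim_equal_get_pos_values : Prop := ∀ (stra : String), Dom_get_pos_values stra → Spec_get_pos_values stra (get_pos_values stra)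

-- ===== LEMMAS AND PROOFS =====

-- common reference: the intended output list, computed structurally
def pvSpec : List Char → Int → Int → List (Int × Int)
  | [], _, _ => []
  | x :: xs, s, c =>
    let c' := c + (if x = '|' then 0 else 1)
    (s, c' - 1) :: pvSpec xs (s + 1) c'

-- A's loop body, on (index, char) pairs
def pvStep (st : PySem.Dict Int Int × Int) (p : Int × Char) : PySem.Dict Int Int × Int :=
  if p.2 ≠ '|' then (st.1.insert p.1 (st.2 + 1 - 1), st.2 + 1)
  else (st.1.insert p.1 (st.2 - 1), st.2)

theorem pvA_enum (stra : String) :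
    get_pos_values stra =
      ((PySem.List.enumerate stra.toList 0).foldl pvStep (PySem.Dict.empty, 0)).1.items := by
  unfold get_pos_values
  rw [PySem.List.enumerate_eq_map_pyRange stra.toList ' ', List.foldl_map]
  rfl

theorem pvA_fold (cs : List Char) : ∀ (s c : Int) (d : PySem.Dict Int Int),
    (∀ k ∈ d.keys, k < s) →
    ((PySem.List.enumerate cs s).foldl pvStep (d, c)).1.items = d.items ++ pvSpec cs s c := by
  induction cs with
  | nil => intro s c d _; simp [PySem.List.enumerate_nil, pvSpec]
  | cons x xs ih =>
    intro s c d hk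
    have hcont : d.contains s = false := by
      by_contra h
      have : s ∈ d.keys := by
        have := PySem.Dict.contains_iff_mem_keys (d := d) (k := s)
        simp at h
        exact this.mp h
      exact absurd (hk s this) (by omega)
    rw [PySem.List.enumerate_cons]
    simp only [List.foldl_cons]
    by_cases hx : x = '|'
    · have hstep : pvStep (d, c) (s, x) = (d.insert s (c - 1), c) := by
        simp [pvStep, hx]
      rw [hstep, ih (s + 1) c (d.insert s (c - 1)) ?_]
      · rw [PySem.Dict.items_insert_of_not_contains _ _ hcont]
        simp [pvSpec, hx]
      · intro k hkmem
        rcases (PySem.Dict.mem_keys_insert _ _ _ _).mp hkmem with h | h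
        · omega
        · exact lt_trans (hk k h) (by omega)
    · have hstep : pvStep (d, c) (s, x) = (d.insert s (c + 1 - 1), c + 1) := by
        simp [pvStep, hx]
      rw [hstep, ih (s + 1) (c + 1) (d.insert s (c + 1 - 1)) ?_]
      · rw [PySem.Dict.items_insert_of_not_contains _ _ hcont]
        simp [pvSpec, hx]
      · intro k hkmem
        rcases (PySem.Dict.mem_keys_insert _ _ _ _).mp hkmem with h | h
        · omega
        · exact lt_trans (hk k h) (by omega)

theorem pvA_spec (stra : String) : get_pos_values stra = pvSpec stra.toList 0 0 := by
  rw [pvA_enum, pvA_fold stra.toList 0 0 PySem.Dict.empty (by simp [PySem.Dict.keys_empty])]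
  rfl

-- pvSpec splits over append
theorem pvSpec_append (xs : List Char) : ∀ (ys : List Char) (s c : Int),
    pvSpec (xs ++ ys) s c =
      pvSpec xs s c ++ pvSpec ys (s + xs.length) (c + ((xs.countP (fun x => x ≠ '|') : Nat) : Int)) := by
  induction xs with
  | nil => intro ys s c; simp [pvSpec]
  | cons x xs ih =>
    intro ys s c
    have hcong : ∀ (s1 s2 c1 c2 : Int), s1 = s2 → c1 = c2 →
        pvSpec ys s1 c1 = pvSpec ys s2 c2 := by
      intro s1 s2 c1 c2 h1 h2; rw [h1, h2]
    by_cases hx : x = '|' <;>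
      simp only [List.cons_append, pvSpec, hx, List.countP_cons, List.length_cons, ne_eq,
        not_true_eq_false, not_false_eq_true, decide_true, decide_false, if_true, if_false,
        Bool.false_eq_true] <;>
      rw [ih] <;>
      refine congrArg₂ _ rfl (congrArg₂ _ rfl (hcong _ _ _ _ (by push_cast; ring) (by push_cast; ring)))

-- on a pipe-free segment pvSpec is an arithmetic progression
theorem pvSpec_nopipe (xs : List Char) : ∀ (s c : Int), '|' ∉ xs →
    pvSpec xs s c = (List.range xs.length).map (fun (k : Nat) => (s + (k : Int), c + (k : Int))) := by
  induction xs with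
  | nil => intro s c _; simp [pvSpec]
  | cons x xs ih =>
    intro s c hnp
    have hx : x ≠ '|' := fun h => hnp (h ▸ List.mem_cons_self)
    have hxs : '|' ∉ xs := fun h => hnp (List.mem_cons_of_mem _ h)
    have hcons : pvSpec (x :: xs) s c = (s, c) :: pvSpec xs (s + 1) (c + 1) := by
      simp [pvSpec, hx]
    rw [hcons, ih (s + 1) (c + 1) hxs, List.length_cons, List.range_succ_eq_map]
    simp only [List.map_map, List.map_cons, Function.comp_def, Nat.cast_zero, add_zero]
    refine congrArg₂ _ rfl ?_
    apply List.map_congr_left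
    intro k _
    simp only [Prod.mk.injEq]
    constructor <;> push_cast <;> ring

-- every piece of splitOn '|' is pipe-free
theorem pvSplit_nopipe (cs : List Char) : ∀ l ∈ cs.splitOn '|', '|' ∉ l := by
  induction cs with
  | nil => intro l hl; simp [List.splitOn_nil] at hl; simp [hl]
  | cons x xs ih =>
    intro l hl
    simp only [List.splitOn, List.splitOnP_cons] at hl ih
    by_cases hx : (x == '|') = true
    · rw [if_pos hx] at hl
      rcases List.mem_cons.mp hl with h | h
      · simp [h]
      · exact ih l h
    · rw [if_neg hx] at hl
      rcases h' : xs.splitOnP (· == '|') with - | ⟨hd, tl⟩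
      · exact absurd h' (List.splitOnP_ne_nil _ xs)
      · rw [h'] at hl ih
        simp only [List.modifyHead_cons] at hl
        rcases List.mem_cons.mp hl with h | h
        · subst h
          intro hmem
          rcases List.mem_cons.mp hmem with h | h
          · exact hx (by simp [h.symm])
          · exact ih hd (List.mem_cons_self) h
        · exact ih l (List.mem_cons_of_mem _ h)

-- B's fold over the pieces produces pvSpec of their intercalation
theorem pvB_fold (n : Int) : ∀ (parts : List (List Char)) (d : PySem.Dict Int Int) (s v : Int),
    parts ≠ [] → (∀ l ∈ parts, '|' ∉ l) → (∀ k ∈ d.keys, k < s) →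
    s + ((([('|' : Char)].intercalate parts).length : Nat) : Int) = n →
    ((parts.foldl (pvSeg n) (d, s, v)).1.items
      = d.items ++ pvSpec ([('|' : Char)].intercalate parts) s (v + 1)) := by
  intro parts
  induction parts with
  | nil => intro d s v h; exact absurd rfl h
  | cons p ps ih =>
    intro d s v _ hnp hk hn
    have hpfree : '|' ∉ p := hnp p List.mem_cons_self
    have hcont : ∀ i ∈ PySem.List.pyRange 0 (p.length : Int) 1, d.contains (s + i) = false := by
      intro i hi
      have hi' := (PySem.List.mem_pyRange_one).mp hi
      by_contra h
      have : s + i ∈ d.keys := by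
        have := PySem.Dict.contains_iff_mem_keys (d := d) (k := s + i)
        simp at h
        exact this.mp h
      have := hk _ this
      omega
    have hnodup : ((PySem.List.pyRange 0 (p.length : Int) 1).map (fun i => s + i)).Nodup := by
      exact (PySem.List.nodup_pyRange_one 0 (p.length : Int)).map
        (fun a b h => by omega)
    have hinner :
        ((PySem.List.pyRange 0 (p.length : Int) 1).foldl
            (fun d k => d.insert (s + k) (v + 1 + k)) d).items
          = d.items ++ (PySem.List.pyRange 0 (p.length : Int) 1).map (fun i => (s + i, v + 1 + i)) := by
      exact PySem.Dict.items_foldl_insert_fresh _ _ _ _ hcont hnodup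
    have hinnerkeys :
        ∀ k ∈ ((PySem.List.pyRange 0 (p.length : Int) 1).foldl
            (fun d k => d.insert (s + k) (v + 1 + k)) d).keys, k < s + (p.length : Int) := by
      intro k hkk
      simp only [PySem.Dict.keys, hinner, List.map_append, List.mem_append, List.map_map] at hkk
      rcases hkk with h | h
      · have := hk k h
        omega
      · simp only [List.mem_map, Function.comp_def] at h
        obtain ⟨i, hi, hieq⟩ := h
        have hi' := (PySem.List.mem_pyRange_one).mp hi
        omega
    have hprog : pvSpec p s (v + 1)
        = (PySem.List.pyRange 0 (p.length : Int) 1).map (fun i => (s + i, v + 1 + i)) := by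
      rw [pvSpec_nopipe p s (v + 1) hpfree, PySem.List.pyRange_one]
      simp only [List.map_map, Int.sub_zero, Int.toNat_natCast]
      apply List.map_congr_left
      intro k _
      simp only [Function.comp_def, Prod.mk.injEq]
      constructor <;> omega
    cases ps with
    | nil =>
      -- last (or only) piece: no separator follows
      have hlen : ([('|' : Char)].intercalate [p]) = p := by
        simp [List.intercalate]
      rw [hlen] at hn ⊢
      simp only [List.foldl_cons, List.foldl_nil]
      unfold pvSeg
      dsimp only
      rw [if_neg (by omega)]
      simp only [hinner, hprog]
    | cons q qs =>
      -- a separator follows this piece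
      have hint : ([('|' : Char)].intercalate (p :: q :: qs))
          = p ++ '|' :: ([('|' : Char)].intercalate (q :: qs)) := by
        simp [List.intercalate, List.intersperse_cons₂]
      rw [hint] at hn ⊢
      have hlt : s + (p.length : Int) < n := by
        simp only [List.length_append, List.length_cons] at hn
        push_cast at hn
        omega
      rw [List.foldl_cons]
      have hstep : pvSeg n (d, s, v) p
          = (((PySem.List.pyRange 0 (p.length : Int) 1).foldl
                (fun d k => d.insert (s + k) (v + 1 + k)) d).insert
              (s + (p.length : Int)) (v + (p.length : Int)),
             s + (p.length : Int) + 1, v + (p.length : Int)) := by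
        unfold pvSeg
        dsimp only
        rw [if_pos hlt]
      rw [hstep]
      have hd'keys : ∀ k ∈ (((PySem.List.pyRange 0 (p.length : Int) 1).foldl
            (fun d k => d.insert (s + k) (v + 1 + k)) d).insert
              (s + (p.length : Int)) (v + (p.length : Int))).keys,
          k < s + (p.length : Int) + 1 := by
        intro k hkk
        rcases (PySem.Dict.mem_keys_insert _ _ _ _).mp hkk with h | h
        · omega
        · have := hinnerkeys k h
          omega
      have hn' : (s + (p.length : Int) + 1)
          + ((([('|' : Char)].intercalate (q :: qs)).length : Nat) : Int) = n := by
        simp only [List.length_append, List.length_cons] at hn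
        push_cast at hn ⊢
        omega
      rw [ih _ _ _ (by simp) (fun l hl => hnp l (List.mem_cons_of_mem _ hl)) hd'keys hn']
      rw [PySem.Dict.items_insert_of_not_contains _ _ ?_]
      · rw [hinner]
        have hcount : ((p.countP (fun x => x ≠ '|') : Nat) : Int) = (p.length : Int) := by
          have : p.countP (fun x => x ≠ '|') = p.length := by
            rw [List.countP_eq_length]
            intro a ha
            simp
            exact fun h => hpfree (h ▸ ha)
          rw [this]
        rw [pvSpec_append, hcount]
        have hpipe : pvSpec ('|' :: ([('|' : Char)].intercalate (q :: qs)))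
              (s + (p.length : Int)) (v + 1 + (p.length : Int))
            = (s + (p.length : Int), v + (p.length : Int))
              :: pvSpec ([('|' : Char)].intercalate (q :: qs))
                  (s + (p.length : Int) + 1) (v + (p.length : Int) + 1) := by
          simp [pvSpec]
          have h1 : v + 1 + (p.length : Int) - 1 = v + (p.length : Int) := by ring
          have h2 : v + 1 + (p.length : Int) = v + (p.length : Int) + 1 := by ring
          rw [h1, h2]
          exact ⟨rfl, rfl⟩
        rw [hpipe, hprog]
        simp only [List.append_assoc, List.cons_append, List.nil_append]
      · by_contra h
        simp only [Bool.not_eq_false] at h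
        have : s + (p.length : Int) ∈ ((PySem.List.pyRange 0 (p.length : Int) 1).foldl
            (fun d k => d.insert (s + k) (v + 1 + k)) d).keys := by
          exact (PySem.Dict.contains_iff_mem_keys _ _).mp h
        have := hinnerkeys _ this
        omega

theorem pvB_spec (stra : String) : get_pos_values_alt stra = pvSpec stra.toList 0 0 := by
  unfold get_pos_values_alt
  have hnn : stra.toList.splitOn '|' ≠ [] := List.splitOnP_ne_nil _ _
  have h := pvB_fold (stra.toList.length : Int) (stra.toList.splitOn '|')
    PySem.Dict.empty 0 (-1) hnn (pvSplit_nopipe stra.toList)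
    (by simp [PySem.Dict.keys_empty])
    (by rw [List.intercalate_splitOn]; simp)
  rw [List.intercalate_splitOn] at h
  simpa using h

-- ===== VERDICT (by name: the statement is the Claim_ definition above) =====
theorem get_pos_values_spec : Claim_equal_get_pos_values := by
  intro stra _
  unfold Spec_get_pos_values
  rw [pvA_spec, pvB_spec]
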